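-- pv_equiv track=rewrite | github.com/yusong652/toyoura-nagisa | packages/backend/application/tools/coding/grep.py | _get_context_lines
-- ===== SOURCE A (Python) =====
-- from typing import List, Dict, Any, Optional, Set
--
-- def _get_context_lines(
--     lines: List[str],
--     match_indices: Set[int],
--     context_before: int,
--     context_after: int
-- ) -> List[tuple]:
--     """Get lines with context around matches.
--
--     Returns list of (line_number, line_content, is_match) tuples.
--     """
--     result = []
--     shown_indices = set()
--
--     for match_idx in sorted(match_indices):
--         start = max(0, match_idx - context_before)
--         end = min(len(lines), match_idx + context_after + 1)
--
--         for i in range(start, end):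
--             if i not in shown_indices:
--                 shown_indices.add(i)
--                 is_match = i in match_indices
--                 result.append((i + 1, lines[i], is_match))  # 1-indexed
--
--     # Sort by line number
--     result.sort(key=lambda x: x[0])
--     return result
-- ===== SOURCE B (Python) =====
-- from typing import List, Set
--
--
-- def _get_context_lines(
--     lines: List[str],
--     match_indices: Set[int],
--     context_before: int,
--     context_after: int
-- ) -> List[tuple]:
--     """Get lines with context around matches.
--
--     Single pass over the sorted matches: since both interval ends are
--     monotone in the match index, a cursor past the last emitted line
--     yields the union of the context intervals already in line order --
--     no seen-set and no final sort needed.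
--     """
--     n = len(lines)
--     result = []
--     cursor = 0  # first index not yet emitted
--     for m in sorted(match_indices):
--         start = max(0, m - context_before, cursor)
--         end = min(n, m + context_after + 1)
--         for i in range(start, end):
--             result.append((i + 1, lines[i], i in match_indices))
--         cursor = max(cursor, end)
--     return result
-- ===== Notes on version B (the rewrite author's own statement) =====
-- stated objective: faster
-- what changed: Instead of deduplicating every context line through a shown-set and sorting the collected result at the end, B keeps a cursor past the last emitted line and, exploiting that both interval endpoints are monotone in the sorted match index, emits the union of the context intervals in one pass already in line order, with no seen-set and no final sort.
import Mathlib
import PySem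

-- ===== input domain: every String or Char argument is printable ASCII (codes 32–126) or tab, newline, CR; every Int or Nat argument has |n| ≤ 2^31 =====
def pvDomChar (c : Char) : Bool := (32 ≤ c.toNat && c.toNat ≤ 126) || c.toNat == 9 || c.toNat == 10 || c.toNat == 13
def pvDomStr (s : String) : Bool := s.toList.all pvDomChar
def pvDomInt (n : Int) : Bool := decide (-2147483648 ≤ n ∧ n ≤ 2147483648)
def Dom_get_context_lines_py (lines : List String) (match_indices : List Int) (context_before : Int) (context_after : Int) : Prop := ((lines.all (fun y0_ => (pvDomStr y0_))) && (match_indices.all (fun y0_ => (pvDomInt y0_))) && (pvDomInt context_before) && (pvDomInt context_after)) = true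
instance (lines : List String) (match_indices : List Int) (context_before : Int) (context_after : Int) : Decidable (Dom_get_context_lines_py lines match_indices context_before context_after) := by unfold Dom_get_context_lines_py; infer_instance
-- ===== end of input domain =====

-- B replaces A's shown-set deduplication plus final sort by a single cursor-driven
-- pass over the sorted matches that emits the union of the context intervals already
-- in line order; equivalence of the return values is proved for all inputs.

-- ===== PORT A =====
-- inner  `for i in range(start, end): if i not in shown_indices: ...`
-- (lines[i] is ported as pyGetD: the loop bounds keep 0 ≤ i < len lines, so the default is never used)
def gclAInner (lines : List String) (mis : List Int)
    (st : List (Int × String × Bool) × PySem.Set Int) :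
    List Int → List (Int × String × Bool) × PySem.Set Int
  | [] => st
  | i :: is =>
    if PySem.Set.contains st.2 i then gclAInner lines mis st is
    else gclAInner lines mis
      (st.1 ++ [(i + 1, PySem.List.pyGetD lines i "", PySem.Set.contains mis i)],
       PySem.Set.add st.2 i) is

-- outer  `for match_idx in sorted(match_indices): ...`
def gclAOuter (lines : List String) (mis : List Int) (cb ca : Int)
    (st : List (Int × String × Bool) × PySem.Set Int) :
    List Int → List (Int × String × Bool) × PySem.Set Int
  | [] => st
  | m :: ms =>
    gclAOuter lines mis cb ca
      (gclAInner lines mis st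
        (PySem.List.pyRange (max 0 (m - cb)) (min (lines.length : Int) (m + ca + 1)) 1))
      ms

def get_context_lines_py (lines : List String) (match_indices : List Int) (context_before : Int) (context_after : Int) : List (Int × String × Bool) :=
  PySem.List.sorted
    (gclAOuter lines match_indices context_before context_after
      ([], PySem.Set.empty)
      (PySem.List.sorted match_indices (fun x => x) false)).1
    (fun t => t.1) false

-- ===== PORT B =====
-- cursor-driven single pass (from Source B); the inner append loop is the map over the range
def gclBLoop (lines : List String) (mis : List Int) (cb ca : Int)
    (res : List (Int × String × Bool)) (cursor : Int) :
    List Int → List (Int × String × Bool)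
  | [] => res
  | m :: ms =>
    gclBLoop lines mis cb ca
      (res ++ (PySem.List.pyRange (max (max 0 (m - cb)) cursor)
                (min (lines.length : Int) (m + ca + 1)) 1).map
          (fun i => (i + 1, PySem.List.pyGetD lines i "", PySem.Set.contains mis i)))
      (max cursor (min (lines.length : Int) (m + ca + 1))) ms

def get_context_lines_py_alt (lines : List String) (match_indices : List Int) (context_before : Int) (context_after : Int) : List (Int × String × Bool) :=
  gclBLoop lines match_indices context_before context_after [] 0
    (PySem.List.sorted match_indices (fun x => x) false)

-- ===== PRECONDITION & SPEC =====
def Spec_get_context_lines_py (lines : List String) (match_indices : List Int) (context_before : Int) (context_after : Int) (out : List (Int × String × Bool)) : Prop := out = get_context_lines_py_alt lines match_indices context_before context_after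
instance (lines : List String) (match_indices : List Int) (context_before : Int) (context_after : Int) (out : List (Int × String × Bool)) : Decidable (Spec_get_context_lines_py lines match_indices context_before context_after out) := by unfold Spec_get_context_lines_py; infer_instance

-- ===== CLAIM (what is proved, stated in full; the proofs are below) =====
def Claim_equal_get_context_lines_py : Prop := ∀ (lines : List String) (match_indices : List Int) (context_before : Int) (context_after : Int), Dom_get_context_lines_py lines match_indices context_before context_after → Spec_get_context_lines_py lines match_indices context_before context_after (get_context_lines_py lines match_indices context_before context_after)

-- ===== LEMMAS AND PROOFS =====

-- the tuple emitted for line index i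
def gclTup (lines : List String) (mis : List Int) (i : Int) : Int × String × Bool :=
  (i + 1, PySem.List.pyGetD lines i "", PySem.Set.contains mis i)

-- i is inside the context window of some match in p
def gclCov (cb ca : Int) (p : List Int) (i : Int) : Bool :=
  p.any (fun m => decide (m - cb ≤ i ∧ i ≤ m + ca))

-- canonical result for the matches processed so far: line order, one tuple per covered index
def gclCanon (lines : List String) (mis : List Int) (cb ca : Int) (p : List Int) :
    List (Int × String × Bool) :=
  (PySem.List.pyRange 0 (lines.length : Int) 1).filterMap
    (fun i => if gclCov cb ca p i then some (gclTup lines mis i) else none)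

theorem gclCov_append (cb ca : Int) (p q : List Int) (i : Int) :
    gclCov cb ca (p ++ q) i = (gclCov cb ca p i || gclCov cb ca q i) := by
  simp [gclCov, List.any_append]

theorem gclCanon_nil (lines : List String) (mis : List Int) (cb ca : Int) :
    gclCanon lines mis cb ca [] = [] := by
  simp [gclCanon, gclCov]

-- the step identity shared by both loops:
-- appending one more (largest-so-far) match extends the canonical list by the
-- tuples of the range [max(start, cursor), end)
theorem gclCanon_snoc (lines : List String) (mis : List Int) (cb ca : Int)
    (p : List Int) (m cursor : Int)
    (hc0 : 0 ≤ cursor)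
    (hcb : ∀ i : Int, 0 ≤ i → i < (lines.length : Int) → gclCov cb ca p i = true → i < cursor)
    (hP : ∀ mnew i : Int, (∀ m' ∈ p, m' ≤ mnew) → max 0 (mnew - cb) ≤ i → i < cursor →
          i < (lines.length : Int) → gclCov cb ca p i = true)
    (hm : ∀ m' ∈ p, m' ≤ m) :
    gclCanon lines mis cb ca (p ++ [m]) =
      gclCanon lines mis cb ca p ++
        (PySem.List.pyRange (max (max 0 (m - cb)) cursor)
          (min (lines.length : Int) (m + ca + 1)) 1).map (gclTup lines mis) := by
  have hn : (0 : Int) ≤ (lines.length : Int) := Int.natCast_nonneg _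
  set n : Int := (lines.length : Int) with hndef
  set s' : Int := max (max 0 (m - cb)) cursor with hs'
  set e : Int := min n (m + ca + 1) with he
  have hcovm : ∀ i : Int, gclCov cb ca [m] i = true ↔ (m - cb ≤ i ∧ i ≤ m + ca) := by
    intro i; simp [gclCov]
  by_cases hse : e ≤ s'
  · rw [PySem.List.pyRange_one_eq_nil hse]
    simp only [List.map_nil, List.append_nil]
    unfold gclCanon
    apply List.filterMap_congr
    intro i hi
    rw [PySem.List.mem_pyRange_one] at hi
    rw [gclCov_append]
    by_cases hp : gclCov cb ca p i = true
    · simp [hp]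
    · by_cases hm' : gclCov cb ca [m] i = true
      · exfalso
        rw [hcovm] at hm'
        have h1 : max 0 (m - cb) ≤ i := by omega
        have h2 : i < e := by omega
        have h3 : i < cursor := by omega
        exact hp (hP m i hm h1 h3 (by omega))
      · simp [hp, hm']
  · rw [not_le] at hse
    have h0s' : 0 ≤ s' := by omega
    have hs'n : s' ≤ n := by omega
    have hen : e ≤ n := by omega
    have hsplit : PySem.List.pyRange 0 n 1 =
        PySem.List.pyRange 0 s' 1 ++ (PySem.List.pyRange s' e 1 ++ PySem.List.pyRange e n 1) := by
      rw [← PySem.List.pyRange_one_append s' e n (by omega) hen,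
          ← PySem.List.pyRange_one_append 0 s' n h0s' hs'n]
    have hcursor_le : cursor ≤ s' := by omega
    -- cov p is false from s' on
    have hphigh : ∀ i : Int, s' ≤ i → i < n → gclCov cb ca p i = false := by
      intro i h1 h2
      by_cases hp : gclCov cb ca p i = true
      · exact absurd (hcb i (by omega) h2 hp) (by omega)
      · exact eq_false_of_ne_true hp
    unfold gclCanon
    rw [hsplit]
    simp only [List.filterMap_append]
    -- middle piece for p ++ [m] is the full map
    have hmid : (PySem.List.pyRange s' e 1).filterMap
        (fun i => if gclCov cb ca (p ++ [m]) i then some (gclTup lines mis i) else none) =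
        (PySem.List.pyRange s' e 1).map (gclTup lines mis) := by
      rw [show ((PySem.List.pyRange s' e 1).map (gclTup lines mis)) =
          (PySem.List.pyRange s' e 1).filterMap (fun i => some (gclTup lines mis i)) by simp]
      apply List.filterMap_congr
      intro i hi
      rw [PySem.List.mem_pyRange_one] at hi
      have : gclCov cb ca (p ++ [m]) i = true := by
        have hm1 : gclCov cb ca [m] i = true := (hcovm i).mpr ⟨by omega, by omega⟩
        rw [gclCov_append, hm1]
        simp
      simp [this]
    -- last piece is empty for both
    have hlast : ∀ q : List Int, (∀ i : Int, e ≤ i → i < n → gclCov cb ca q i = false) →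
        (PySem.List.pyRange e n 1).filterMap
          (fun i => if gclCov cb ca q i then some (gclTup lines mis i) else none) = [] := by
      intro q hq
      apply List.filterMap_eq_nil_iff.mpr
      intro i hi
      rw [PySem.List.mem_pyRange_one] at hi
      simp [hq i hi.1 hi.2]
    have hlastp : ∀ i : Int, e ≤ i → i < n → gclCov cb ca p i = false := by
      intro i h1 h2; exact hphigh i (by omega) h2
    have hlastpm : ∀ i : Int, e ≤ i → i < n → gclCov cb ca (p ++ [m]) i = false := by
      intro i h1 h2
      rw [gclCov_append, hlastp i h1 h2]
      have : ¬ (gclCov cb ca [m] i = true) := by rw [hcovm]; omega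
      simp [eq_false_of_ne_true this]
    -- first piece agrees between p and p ++ [m]
    have hfirst : (PySem.List.pyRange 0 s' 1).filterMap
        (fun i => if gclCov cb ca (p ++ [m]) i then some (gclTup lines mis i) else none) =
        (PySem.List.pyRange 0 s' 1).filterMap
        (fun i => if gclCov cb ca p i then some (gclTup lines mis i) else none) := by
      apply List.filterMap_congr
      intro i hi
      rw [PySem.List.mem_pyRange_one] at hi
      rw [gclCov_append]
      by_cases hp : gclCov cb ca p i = true
      · simp [hp]
      · by_cases hm' : gclCov cb ca [m] i = true
        · exfalso
          rw [hcovm] at hm'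
          exact hp (hP m i hm (by omega) (by omega) (by omega))
        · simp [hp, hm']
    -- middle piece for p is empty
    have hmidp : (PySem.List.pyRange s' e 1).filterMap
        (fun i => if gclCov cb ca p i then some (gclTup lines mis i) else none) = [] := by
      apply List.filterMap_eq_nil_iff.mpr
      intro i hi
      rw [PySem.List.mem_pyRange_one] at hi
      simp [hphigh i hi.1 (by omega)]
    rw [hmid, hlast p hlastp, hlast (p ++ [m]) hlastpm, hfirst, hmidp]
    simp

-- B's loop computes the canonical list
theorem gclBLoop_eq (lines : List String) (mis : List Int) (cb ca : Int)
    (ms p : List Int) (cursor : Int)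
    (hms : ms.Pairwise (· ≤ ·))
    (hmono : ∀ m ∈ ms, ∀ m' ∈ p, m' ≤ m)
    (hc0 : 0 ≤ cursor)
    (hcb : ∀ i : Int, 0 ≤ i → i < (lines.length : Int) → gclCov cb ca p i = true → i < cursor)
    (hP : ∀ mnew i : Int, (∀ m' ∈ p, m' ≤ mnew) → max 0 (mnew - cb) ≤ i → i < cursor →
          i < (lines.length : Int) → gclCov cb ca p i = true) :
    gclBLoop lines mis cb ca (gclCanon lines mis cb ca p) cursor ms =
      gclCanon lines mis cb ca (p ++ ms) := by
  induction ms generalizing p cursor with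
  | nil => simp [gclBLoop]
  | cons m tl ih =>
    rcases List.pairwise_cons.mp hms with ⟨hmtl, htl⟩
    have hm : ∀ m' ∈ p, m' ≤ m := fun m' hm' => hmono m (List.mem_cons_self ..) m' hm'
    have htup : (fun i : Int => (i + 1, PySem.List.pyGetD lines i "", PySem.Set.contains mis i)) =
        gclTup lines mis := rfl
    rw [gclBLoop, htup, ← gclCanon_snoc lines mis cb ca p m cursor hc0 hcb hP hm]
    have hcovm : ∀ i : Int, gclCov cb ca [m] i = true ↔ (m - cb ≤ i ∧ i ≤ m + ca) := by
      intro i; simp [gclCov]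
    have hstep := ih (p ++ [m]) (max cursor (min (lines.length : Int) (m + ca + 1))) htl
      (by
        intro x hx m' hm'
        rcases List.mem_append.mp hm' with h | h
        · exact hmono x (List.mem_cons_of_mem _ hx) m' h
        · rw [List.mem_singleton.mp h]; exact hmtl x hx)
      (by omega)
      (by
        intro i h0 hlt hcov
        rw [gclCov_append] at hcov
        rcases Bool.or_eq_true_iff.mp hcov with h | h
        · have := hcb i h0 hlt h; omega
        · rw [hcovm] at h; omega)
      (by
        intro mnew i hall h1 h2 h3
        have hallp : ∀ m' ∈ p, m' ≤ mnew := fun m' h => hall m' (List.mem_append_left _ h)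
        have hmle : m ≤ mnew := hall m (List.mem_append_right _ (List.mem_singleton_self _))
        rw [gclCov_append]
        by_cases hic : i < cursor
        · rw [hP mnew i hallp h1 hic h3]; simp
        · have hm1 : gclCov cb ca [m] i = true := (hcovm i).mpr ⟨by omega, by omega⟩
          rw [hm1]; simp)
    rw [hstep, List.append_assoc, List.singleton_append]

-- A's inner loop: append the unseen indices, mark the whole range seen
theorem gclAInner_spec (lines : List String) (mis : List Int)
    (res : List (Int × String × Bool)) (shown : PySem.Set Int) (is : List Int)
    (hnd : is.Nodup) :
    gclAInner lines mis (res, shown) is =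
      (res ++ is.filterMap
          (fun i => if PySem.Set.contains shown i then none else some (gclTup lines mis i)),
       PySem.Set.update shown is) := by
  induction is generalizing res shown with
  | nil => simp [gclAInner, PySem.Set.update]
  | cons i tl ih =>
    rcases List.nodup_cons.mp hnd with ⟨hni, htl⟩
    rw [gclAInner]
    by_cases hc : PySem.Set.contains shown i = true
    · rw [if_pos hc, ih res shown htl]
      have hc' : i ∈ shown := (PySem.Set.contains_iff _ _).mp hc
      simp [PySem.Set.update, hc']
    · rw [if_neg hc]
      rw [ih _ _ htl]
      have hcongr : ∀ j ∈ tl, (fun j => if PySem.Set.contains (PySem.Set.add shown i) j then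
            none else some (gclTup lines mis j)) j =
          (fun j => if PySem.Set.contains shown j then none else some (gclTup lines mis j)) j := by
        intro j hj
        have hne : j ≠ i := fun h => hni (h ▸ hj)
        have : PySem.Set.contains (PySem.Set.add shown i) j = PySem.Set.contains shown j := by
          by_cases h : PySem.Set.contains shown j = true
        
          · rw [h]
            rw [PySem.Set.contains_iff] at h ⊢
            exact (PySem.Set.mem_add _ _ _).mpr (Or.inl h)
          · rw [Bool.not_eq_true] at h
            rw [h, ← Bool.not_eq_true, PySem.Set.contains_iff]
            rw [PySem.Set.mem_add]
            rintro (hj' | hj')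
            · rw [← PySem.Set.contains_iff] at hj'
              rw [hj'] at h
              cases h
            · exact hne hj'
        simp only [this]
      rw [List.filterMap_congr hcongr]
      have hc' : i ∉ shown := fun h => hc ((PySem.Set.contains_iff _ _).mpr h)
      simp [PySem.Set.update, PySem.Set.add, hc', gclTup]

-- A's outer loop computes the canonical list too
theorem gclAOuter_eq (lines : List String) (mis : List Int) (cb ca : Int)
    (ms p : List Int) (shown : PySem.Set Int) (cursor : Int)
    (hms : ms.Pairwise (· ≤ ·))
    (hmono : ∀ m ∈ ms, ∀ m' ∈ p, m' ≤ m)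
    (hshown : ∀ i : Int, PySem.Set.contains shown i = true ↔
        (gclCov cb ca p i = true ∧ 0 ≤ i ∧ i < (lines.length : Int)))
    (hc0 : 0 ≤ cursor)
    (hcb : ∀ i : Int, 0 ≤ i → i < (lines.length : Int) → gclCov cb ca p i = true → i < cursor)
    (hP : ∀ mnew i : Int, (∀ m' ∈ p, m' ≤ mnew) → max 0 (mnew - cb) ≤ i → i < cursor →
          i < (lines.length : Int) → gclCov cb ca p i = true) :
    (gclAOuter lines mis cb ca (gclCanon lines mis cb ca p, shown) ms).1 =
      gclCanon lines mis cb ca (p ++ ms) := by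
  induction ms generalizing p shown cursor with
  | nil => simp [gclAOuter]
  | cons m tl ih =>
    rcases List.pairwise_cons.mp hms with ⟨hmtl, htl⟩
    have hm : ∀ m' ∈ p, m' ≤ m := fun m' hm' => hmono m (List.mem_cons_self ..) m' hm'
    have hcovm : ∀ i : Int, gclCov cb ca [m] i = true ↔ (m - cb ≤ i ∧ i ≤ m + ca) := by
      intro i; simp [gclCov]
    rw [gclAOuter, gclAInner_spec lines mis _ _ _ (PySem.List.nodup_pyRange_one _ _)]
    -- the appended chunk is exactly the cursor-clipped range
    have hchunk : (PySem.List.pyRange (max 0 (m - cb)) (min (lines.length : Int) (m + ca + 1)) 1).filterMap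
        (fun i => if PySem.Set.contains shown i then none else some (gclTup lines mis i)) =
        (PySem.List.pyRange (max (max 0 (m - cb)) cursor)
          (min (lines.length : Int) (m + ca + 1)) 1).map (gclTup lines mis) := by
      by_cases hse : min (lines.length : Int) (m + ca + 1) ≤ max (max 0 (m - cb)) cursor
      · rw [PySem.List.pyRange_one_eq_nil hse, List.map_nil]
        apply List.filterMap_eq_nil_iff.mpr
        intro i hi
        rw [PySem.List.mem_pyRange_one] at hi
        have hcov : gclCov cb ca p i = true :=
          hP m i hm (by omega) (by omega) (by omega)
        have : i ∈ shown :=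
          (PySem.Set.contains_iff _ _).mp ((hshown i).mpr ⟨hcov, by omega, by omega⟩)
        simp [this]
      · rw [not_le] at hse
        rw [PySem.List.pyRange_one_append (max 0 (m - cb)) (max (max 0 (m - cb)) cursor)
              (min (lines.length : Int) (m + ca + 1)) (by omega) (by omega),
            List.filterMap_append]
        have h1 : (PySem.List.pyRange (max 0 (m - cb)) (max (max 0 (m - cb)) cursor) 1).filterMap
            (fun i => if PySem.Set.contains shown i then none else some (gclTup lines mis i)) = [] := by
          apply List.filterMap_eq_nil_iff.mpr
          intro i hi
          rw [PySem.List.mem_pyRange_one] at hi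
          have hcov : gclCov cb ca p i = true :=
            hP m i hm (by omega) (by omega) (by omega)
          have : i ∈ shown :=
            (PySem.Set.contains_iff _ _).mp ((hshown i).mpr ⟨hcov, by omega, by omega⟩)
          simp [this]
        have h2 : (PySem.List.pyRange (max (max 0 (m - cb)) cursor)
            (min (lines.length : Int) (m + ca + 1)) 1).filterMap
            (fun i => if PySem.Set.contains shown i then none else some (gclTup lines mis i)) =
            (PySem.List.pyRange (max (max 0 (m - cb)) cursor)
              (min (lines.length : Int) (m + ca + 1)) 1).map (gclTup lines mis) := by
          rw [show ((PySem.List.pyRange (max (max 0 (m - cb)) cursor)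
              (min (lines.length : Int) (m + ca + 1)) 1).map (gclTup lines mis)) =
              (PySem.List.pyRange (max (max 0 (m - cb)) cursor)
                (min (lines.length : Int) (m + ca + 1)) 1).filterMap
                (fun i => some (gclTup lines mis i)) by simp]
          apply List.filterMap_congr
          intro i hi
          rw [PySem.List.mem_pyRange_one] at hi
          have hns : i ∉ shown := by
            intro hcon
            rcases (hshown i).mp ((PySem.Set.contains_iff _ _).mpr hcon) with ⟨hcov, h0, hlt⟩
            have := hcb i h0 hlt hcov
            omega
          simp [hns]
        rw [h1, h2, List.nil_append]
    rw [hchunk]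
    rw [← gclCanon_snoc lines mis cb ca p m cursor hc0 hcb hP hm]
    have hshown' : ∀ i : Int, PySem.Set.contains (PySem.Set.update shown
        (PySem.List.pyRange (max 0 (m - cb)) (min (lines.length : Int) (m + ca + 1)) 1)) i = true ↔
        (gclCov cb ca (p ++ [m]) i = true ∧ 0 ≤ i ∧ i < (lines.length : Int)) := by
      intro i
      rw [PySem.Set.contains_iff, PySem.Set.mem_update, ← PySem.Set.contains_iff, hshown i,
          PySem.List.mem_pyRange_one, gclCov_append]
      constructor
      · rintro (⟨hcov, h0, hlt⟩ | ⟨h1, h2⟩)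
        · exact ⟨by rw [hcov]; simp, h0, hlt⟩
        · have : gclCov cb ca [m] i = true := (hcovm i).mpr ⟨by omega, by omega⟩
          exact ⟨by rw [this]; simp, by omega, by omega⟩
      · rintro ⟨hcov, h0, hlt⟩
        rcases Bool.or_eq_true_iff.mp hcov with h | h
        · exact Or.inl ⟨h, h0, hlt⟩
        · rw [hcovm] at h
          exact Or.inr ⟨by omega, by omega⟩
    rw [show p ++ m :: tl = (p ++ [m]) ++ tl by simp]
    exact ih (p ++ [m]) _ (max cursor (min (lines.length : Int) (m + ca + 1))) htl
      (by
        intro x hx m' hm'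
        rcases List.mem_append.mp hm' with h | h
        · exact hmono x (List.mem_cons_of_mem _ hx) m' h
        · rw [List.mem_singleton.mp h]; exact hmtl x hx)
      hshown'
      (by omega)
      (by
        intro i h0 hlt hcov
        rw [gclCov_append] at hcov
        rcases Bool.or_eq_true_iff.mp hcov with h | h
        · have := hcb i h0 hlt h; omega
        · rw [hcovm] at h; omega)
      (by
        intro mnew i hall h1 h2 h3
        have hallp : ∀ m' ∈ p, m' ≤ mnew := fun m' h => hall m' (List.mem_append_left _ h)
        have hmle : m ≤ mnew := hall m (List.mem_append_right _ (List.mem_singleton_self _))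
        rw [gclCov_append]
        by_cases hic : i < cursor
        · rw [hP mnew i hallp h1 hic h3]; simp
        · have hm1 : gclCov cb ca [m] i = true := (hcovm i).mpr ⟨by omega, by omega⟩
          rw [hm1]; simp)

-- the canonical list is strictly increasing in its first component
theorem gclCanon_pairwise (lines : List String) (mis : List Int) (cb ca : Int) (p : List Int) :
    (gclCanon lines mis cb ca p).Pairwise (fun a b => a.1 ≤ b.1) := by
  unfold gclCanon
  rw [List.pairwise_filterMap]
  apply List.Pairwise.imp ?_ (PySem.List.pairwise_lt_pyRange_one 0 (lines.length : Int))
  intro a b hab x hx y hy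
  have hxa : x = gclTup lines mis a := by
    by_cases h : gclCov cb ca p a = true <;> simp [h] at hx
    exact hx.symm
  have hyb : y = gclTup lines mis b := by
    by_cases h : gclCov cb ca p b = true <;> simp [h] at hy
    exact hy.symm
  rw [hxa, hyb]
  simp [gclTup]
  omega

-- ===== VERDICT (by name: the statement is the Claim_ definition above) =====
theorem get_context_lines_py_spec : Claim_equal_get_context_lines_py := by
  intro lines mis cb ca _
  unfold Spec_get_context_lines_py get_context_lines_py get_context_lines_py_alt
  have hpair : (PySem.List.sorted mis (fun x => x) false).Pairwise (· ≤ ·) := by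
    simpa using PySem.List.sorted_pairwise mis (fun x => x)
  have hmono : ∀ m ∈ PySem.List.sorted mis (fun x => x) false, ∀ m' ∈ ([] : List Int), m' ≤ m := by
    simp
  have hcb : ∀ i : Int, 0 ≤ i → i < (lines.length : Int) →
      gclCov cb ca ([] : List Int) i = true → i < 0 := by
    intro i _ _ h; simp [gclCov] at h
  have hP : ∀ mnew i : Int, (∀ m' ∈ ([] : List Int), m' ≤ mnew) → max 0 (mnew - cb) ≤ i →
      i < 0 → i < (lines.length : Int) → gclCov cb ca ([] : List Int) i = true := by
    intro mnew i _ h1 h2 _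
    omega
  have hB := gclBLoop_eq lines mis cb ca (PySem.List.sorted mis (fun x => x) false) [] 0
    hpair hmono (le_refl 0) hcb hP
  have hA := gclAOuter_eq lines mis cb ca (PySem.List.sorted mis (fun x => x) false) []
    PySem.Set.empty 0 hpair hmono
    (by
      intro i
      constructor
      · intro h
        rw [PySem.Set.contains_iff] at h
        simp [PySem.Set.empty] at h
      · rintro ⟨h, -⟩
        simp [gclCov] at h)
    (le_refl 0) hcb hP
  rw [gclCanon_nil] at hA hB
  rw [hA, hB, List.nil_append]
  exact PySem.List.sorted_eq_self_of_pairwise _ _ (gclCanon_pairwise lines mis cb ca _)
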